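-- pv_equiv track=rewrite | github.com/joshuagladwin/The-Big-Book-of-Small-Python-Projects | Projects/Project #16 Diamonds/diamonds_to_file.py | return_outline_diamond
-- ===== SOURCE A (Python) =====
-- def return_outline_diamond(size):
--     # Display the top half of the diamond:
--     s = ''
--     for i in range(size):
--         s += ' ' * (size - i - 1)  # Left side space.
--         s += '/'  # Left side of diamond.
--         s += ' ' * (i * 2)  # Interior of diamond.
--         s += '\\\n'  # Right side of the diamond.
--     # Display the bottom half of the diamond:
--     for i in range(size):
--         s += ' ' * i  # Left side space.
--         s += '\\'  # Left side of diamond.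
--         s += ' ' * ((size - i - 1) * 2)  # Interior of diamond.
--         s += '/\n'  # Right side of diamond.
--     return s
-- ===== SOURCE B (Python) =====
-- def return_outline_diamond(size):
--     # Build the top half only, then derive the bottom half by mirror symmetry:
--     # bottom line i is top line size-1-i with '/' and '\' swapped.
--     swap = str.maketrans('/\\', '\\/')
--     top = [' ' * (size - i - 1) + '/' + ' ' * (2 * i) + '\\' for i in range(size)]
--     bottom = [line.translate(swap) for line in reversed(top)]
--     return ''.join(line + '\n' for line in top + bottom)
-- ===== Notes on version B (the rewrite author's own statement) =====
-- stated objective: alternative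
-- what changed: B builds only the top half as a list of line strings and derives the bottom half by reversing that list and swapping '/' with '\' (mirror symmetry), then joins all lines, instead of A's two independent character-arithmetic accumulation loops.
import Mathlib
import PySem

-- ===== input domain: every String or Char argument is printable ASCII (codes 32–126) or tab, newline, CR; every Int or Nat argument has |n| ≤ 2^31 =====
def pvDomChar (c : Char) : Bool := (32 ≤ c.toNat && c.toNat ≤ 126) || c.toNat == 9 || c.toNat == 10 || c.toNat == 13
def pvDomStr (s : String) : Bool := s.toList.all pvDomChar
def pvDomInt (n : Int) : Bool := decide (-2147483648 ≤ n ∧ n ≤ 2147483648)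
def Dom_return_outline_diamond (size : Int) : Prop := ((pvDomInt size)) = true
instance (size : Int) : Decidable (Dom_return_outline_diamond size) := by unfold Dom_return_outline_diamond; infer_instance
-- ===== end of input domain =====

-- B builds only the top-half lines and derives the bottom half by reversing and
-- swapping the diagonals (mirror symmetry), instead of A's two accumulation loops.


-- ===== PORT A =====
-- ' ' * n  (Python string repetition; empty for n ≤ 0)
def pvSp (n : Int) : String := String.ofList (PySem.List.pyRepeat [' '] n)

def return_outline_diamond (size : Int) : String :=
  -- top half: s += spaces + '/' + spaces + '\'+'\n'
  let s : String := (PySem.List.pyRange 0 size 1).foldl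
    (fun s i => s ++ pvSp (size - i - 1) ++ "/" ++ pvSp (i * 2) ++ "\\\n") ""
  -- bottom half: s += spaces + '\' + spaces + '/'+'\n'
  (PySem.List.pyRange 0 size 1).foldl
    (fun s i => s ++ pvSp i ++ "\\" ++ pvSp ((size - i - 1) * 2) ++ "/\n") s

-- ===== PORT B =====
-- str.translate(str.maketrans('/\\', '\\/')) : swap the two diagonal characters
def pvSwapC (c : Char) : Char := if c = '/' then '\\' else if c = '\\' then '/' else c
def pvMirror (l : String) : String := String.ofList (l.toList.map pvSwapC)
def pvTopLine (size i : Int) : String := pvSp (size - i - 1) ++ "/" ++ pvSp (2 * i) ++ "\\"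

def return_outline_diamond_alt (size : Int) : String :=
  let top := (PySem.List.pyRange 0 size 1).map (pvTopLine size)
  let bottom := top.reverse.map pvMirror
  PySem.Str.join "" ((top ++ bottom).map (fun l => l ++ "\n"))

-- ===== PRECONDITION & SPEC =====
def Spec_return_outline_diamond (size : Int) (out : String) : Prop := out = return_outline_diamond_alt size
instance (size : Int) (out : String) : Decidable (Spec_return_outline_diamond size out) := by unfold Spec_return_outline_diamond; infer_instance

-- ===== CLAIM (what is proved, stated in full; the proofs are below) =====
def Claim_equal_return_outline_diamond : Prop := ∀ (size : Int), Dom_return_outline_diamond size → Spec_return_outline_diamond size (return_outline_diamond size)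

-- ===== LEMMAS AND PROOFS =====

theorem pvSp_toList (n : Int) : (pvSp n).toList = List.replicate n.toNat ' ' := by
  simp [pvSp, PySem.List.pyRepeat_singleton]

-- A's append loop, at the character level
theorem pv_foldl4_toList (f1 f2 f3 f4 : Int → String) (L : List Int) (s0 : String) :
    (L.foldl (fun s i => s ++ f1 i ++ f2 i ++ f3 i ++ f4 i) s0).toList
      = s0.toList ++ L.flatMap
          (fun i => (f1 i).toList ++ (f2 i).toList ++ (f3 i).toList ++ (f4 i).toList) := by
  induction L generalizing s0 with
  | nil => simp
  | cons h t ih => simp [ih]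

-- ''.join at the character level
theorem pvJoinAux : ∀ (L : List (List Char)), (List.intersperse [] L).flatten = L.flatten
  | [] => rfl
  | [_] => by simp
  | a :: b :: t => by
      have ih := pvJoinAux (b :: t)
      show (a :: [] :: List.intersperse [] (b :: t)).flatten = _
      simp only [List.flatten_cons] at ih ⊢
      simp [ih]

theorem pv_join_toList (l : List String) :
    (PySem.Str.join "" l).toList = l.flatMap String.toList := by
  have h := pvJoinAux (l.map String.toList)
  simp [PySem.Chars.join, List.intercalate, List.flatMap_def, h]

theorem pv_reverse_range (n : Nat) :
    (List.range n).reverse = (List.range n).map (fun k => n - 1 - k) := by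
  apply List.ext_getElem
  · simp
  · intro k h1 h2
    simp

theorem pv_map_reverse_range {α : Type} (g : Nat → α) (n : Nat) :
    (List.map g (List.range n)).reverse = List.map (fun k => g (n - 1 - k)) (List.range n) := by
  rw [← List.map_reverse, pv_reverse_range, List.map_map]
  rfl

theorem return_outline_diamond_eq (size : Int) :
    return_outline_diamond size = return_outline_diamond_alt size := by
  have hrange : PySem.List.pyRange 0 size 1
      = (List.range size.toNat).map (fun k : Nat => (k : Int)) := by
    rw [PySem.List.pyRange_one]
    simp
  apply String.toList_injective
  rw [show return_outline_diamond size
      = ((PySem.List.pyRange 0 size 1).foldl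
          (fun s i => s ++ pvSp i ++ "\\" ++ pvSp ((size - i - 1) * 2) ++ "/\n")
          ((PySem.List.pyRange 0 size 1).foldl
            (fun s i => s ++ pvSp (size - i - 1) ++ "/" ++ pvSp (i * 2) ++ "\\\n") "")) from rfl]
  rw [pv_foldl4_toList, pv_foldl4_toList]
  rw [show return_outline_diamond_alt size
      = PySem.Str.join ""
          ((((PySem.List.pyRange 0 size 1).map (pvTopLine size))
            ++ (((PySem.List.pyRange 0 size 1).map (pvTopLine size)).reverse.map pvMirror)).map
            (fun l => l ++ "\n")) from rfl]
  rw [pv_join_toList]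
  rw [hrange]
  by_cases hle : size ≤ 0
  · have : size.toNat = 0 := by omega
    simp [this]
  · have hpos : 0 < size := by omega
    have hsz : size = (size.toNat : Int) := by omega
    set n := size.toNat with hn
    rw [List.map_map, pv_map_reverse_range, List.map_append]
    simp only [List.map_map, List.flatMap_append, List.flatMap_map, Function.comp_def]
    rw [show ("".toList : List Char) = [] from rfl, List.nil_append]
    refine congrArg₂ (· ++ ·) (List.flatMap_congr ?_) (List.flatMap_congr ?_)
    · -- top half: lines agree character for character
      intro k hk
      simp only [List.mem_range] at hk
      have e2 : ((k : Int) * 2).toNat = (2 * (k : Int)).toNat := by omega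
      simp [pvTopLine, pvSp_toList, e2]
    · -- bottom half: mirrored reversed top line = A's bottom line
      intro k hk
      simp only [List.mem_range] at hk
      have e1 : (size - ((n - 1 - k : Nat) : Int) - 1).toNat = k := by omega
      have e2 : (2 * ((n - 1 - k : Nat) : Int)).toNat = ((size - (k : Int) - 1) * 2).toNat := by omega
      simp [pvMirror, pvTopLine, pvSp_toList, pvSwapC, e1, e2]

-- ===== VERDICT (by name: the statement is the Claim_ definition above) =====
theorem return_outline_diamond_spec : Claim_equal_return_outline_diamond := by
  intro size _
  unfold Spec_return_outline_diamond
  exact return_outline_diamond_eq size
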